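-- pv_equiv track=rewrite | github.com/nlwtest2020/AyElSeeMoldo | curriculum-planner/scripts/stage1_parse.py | _merge_pacing_blocks
-- ===== SOURCE A (Python) =====
-- def _is_pacing_subblock(activity_name: str) -> bool:
--     """Check if this block is a pacing sub-block that should merge with parent."""
--     lower = activity_name.lower().strip()
--     return lower.startswith("pacing:") or lower.startswith("pacing ")
--
-- def _merge_pacing_blocks(blocks: list[dict]) -> list[dict]:
--     """Merge pacing sub-blocks into their parent activity blocks."""
--     merged = []
--     for block in blocks:
--         name = block.get("activity_name", "")
--         if _is_pacing_subblock(name) and merged: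
--             parent = merged[-1]
--             # Extract pacing info from the sub-block name
--             pacing_text = name
--             if not parent.get("pacing"):
--                 parent["pacing"] = pacing_text
--             else:
--                 parent["pacing"] += " " + pacing_text
--             # Merge any delivery instructions or notes
--             if block.get("delivery_instructions"):
--                 parent["delivery_instructions"] = (
--                     parent.get("delivery_instructions", "") + " " +
--                     block["delivery_instructions"]
--                 ).strip()
--             if block.get("instructor_notes"):
--                 parent["instructor_notes"] = (
--                     parent.get("instructor_notes", "") + " " +
--                     block["instructor_notes"]
--                 ).strip()
--         else:
--             merged.append(block)
--     return merged
-- ===== SOURCE B (Python) =====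
-- def _is_pacing_subblock(activity_name: str) -> bool:
--     lower = activity_name.lower().strip()
--     return lower.startswith("pacing:") or lower.startswith("pacing ")
--
-- def _absorb_all(group):
--     parent = group[0]
--     for sub in group[1:]:
--         name = sub.get("activity_name", "")
--         if not parent.get("pacing"):
--             parent["pacing"] = name
--         else:
--             parent["pacing"] += " " + name
--         if sub.get("delivery_instructions"):
--             parent["delivery_instructions"] = (
--                 parent.get("delivery_instructions", "") + " " + sub["delivery_instructions"]
--             ).strip()
--         if sub.get("instructor_notes"):
--             parent["instructor_notes"] = (
--                 parent.get("instructor_notes", "") + " " + sub["instructor_notes"]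
--             ).strip()
--     return parent
--
-- def _merge_pacing_blocks(blocks: list[dict]) -> list[dict]:
--     # pass 1: group each parent block with the run of pacing sub-blocks that follows it
--     groups = []
--     for block in blocks:
--         if groups and _is_pacing_subblock(block.get("activity_name", "")):
--             groups[-1].append(block)
--         else:
--             groups.append([block])
--     # pass 2: fold each group's sub-blocks into its head block
--     return [_absorb_all(group) for group in groups]
-- ===== Notes on version B (the rewrite author's own statement) =====
-- stated objective: alternative
-- what changed: B replaces A's single fold that mutates the last merged block with a two-pass decomposition: first group each parent with its run of pacing sub-blocks, then fold every group's sub-blocks into its head and emit the heads.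
import Mathlib
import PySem

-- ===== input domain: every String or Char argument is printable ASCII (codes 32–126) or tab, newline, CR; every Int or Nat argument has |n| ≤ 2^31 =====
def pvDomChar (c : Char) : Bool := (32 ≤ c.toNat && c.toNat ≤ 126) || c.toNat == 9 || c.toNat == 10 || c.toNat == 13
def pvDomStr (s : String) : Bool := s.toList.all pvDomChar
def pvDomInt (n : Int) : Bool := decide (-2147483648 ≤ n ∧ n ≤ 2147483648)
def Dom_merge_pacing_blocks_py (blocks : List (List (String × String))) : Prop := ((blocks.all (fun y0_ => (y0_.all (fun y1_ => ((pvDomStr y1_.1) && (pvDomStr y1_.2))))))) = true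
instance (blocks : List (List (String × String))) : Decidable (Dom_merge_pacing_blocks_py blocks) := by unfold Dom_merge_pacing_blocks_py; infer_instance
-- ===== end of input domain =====

-- B regroups the work into two passes (group parents with their pacing sub-blocks, then fold each
-- group into its head); objective: alternative decomposition, same cost. Both A and B mutate the
-- parent dicts in place in Python; the equivalence proved here is about the return value.

-- dict helpers (assoc list, first-match lookup, overwrite-in-place insert — Python dict semantics)
def pvDictGetD (d : List (String × String)) (k : String) (dflt : String) : String :=
  ((d.find? (fun p => p.1 == k)).map (·.2)).getD dflt

def pvDictSet (d : List (String × String)) (k : String) (v : String) : List (String × String) :=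
  match d with
  | [] => [(k, v)]
  | p :: rest => if p.1 == k then (k, v) :: rest else p :: pvDictSet rest k v

-- ===== PORT A =====
def is_pacing_subblock_py (activity_name : String) : Bool :=
  let lower := PySem.Str.strip (PySem.Str.lower activity_name)
  PySem.Str.startswith lower "pacing:" || PySem.Str.startswith lower "pacing "

def merge_pacing_blocks_py (blocks : List (List (String × String))) : List (List (String × String)) :=
  blocks.foldl (fun merged block =>
    let name := pvDictGetD block "activity_name" ""
    if is_pacing_subblock_py name && !merged.isEmpty then
      let parent := merged.getLastD []
      let pacing_text := name
      let parent :=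
        if pvDictGetD parent "pacing" "" == "" then pvDictSet parent "pacing" pacing_text
        else pvDictSet parent "pacing" (pvDictGetD parent "pacing" "" ++ " " ++ pacing_text)
      let parent :=
        if pvDictGetD block "delivery_instructions" "" != "" then
          pvDictSet parent "delivery_instructions"
            (PySem.Str.strip (pvDictGetD parent "delivery_instructions" "" ++ " " ++ pvDictGetD block "delivery_instructions" ""))
        else parent
      let parent :=
        if pvDictGetD block "instructor_notes" "" != "" then
          pvDictSet parent "instructor_notes"
            (PySem.Str.strip (pvDictGetD parent "instructor_notes" "" ++ " " ++ pvDictGetD block "instructor_notes" ""))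
        else parent
      merged.dropLast ++ [parent]
    else merged ++ [block]) []

-- ===== PORT B =====
def pvAbsorb (parent sub : List (String × String)) : List (String × String) :=
  let name := pvDictGetD sub "activity_name" ""
  let parent :=
    if pvDictGetD parent "pacing" "" == "" then pvDictSet parent "pacing" name
    else pvDictSet parent "pacing" (pvDictGetD parent "pacing" "" ++ " " ++ name)
  let parent :=
    if pvDictGetD sub "delivery_instructions" "" != "" then
      pvDictSet parent "delivery_instructions"
        (PySem.Str.strip (pvDictGetD parent "delivery_instructions" "" ++ " " ++ pvDictGetD sub "delivery_instructions" ""))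
    else parent
  if pvDictGetD sub "instructor_notes" "" != "" then
    pvDictSet parent "instructor_notes"
      (PySem.Str.strip (pvDictGetD parent "instructor_notes" "" ++ " " ++ pvDictGetD sub "instructor_notes" ""))
  else parent

def pvAbsorbAll (group : List (List (String × String))) : List (String × String) :=
  group.tail.foldl pvAbsorb (group.headD [])

def merge_pacing_blocks_py_alt (blocks : List (List (String × String))) : List (List (String × String)) :=
  let groups := blocks.foldl (fun gs block =>
    if !gs.isEmpty && is_pacing_subblock_py (pvDictGetD block "activity_name" "") then
      gs.dropLast ++ [gs.getLastD [] ++ [block]]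
    else gs ++ [[block]]) ([] : List (List (List (String × String))))
  groups.map pvAbsorbAll

-- ===== PRECONDITION & SPEC =====
def Spec_merge_pacing_blocks_py (blocks : List (List (String × String))) (out : List (List (String × String))) : Prop := out = merge_pacing_blocks_py_alt blocks
instance (blocks : List (List (String × String))) (out : List (List (String × String))) : Decidable (Spec_merge_pacing_blocks_py blocks out) := by unfold Spec_merge_pacing_blocks_py; infer_instance

-- ===== CLAIM (what is proved, stated in full; the proofs are below) =====
def Claim_equal_merge_pacing_blocks_py : Prop := ∀ (blocks : List (List (String × String))), Dom_merge_pacing_blocks_py blocks → Spec_merge_pacing_blocks_py blocks (merge_pacing_blocks_py blocks)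

-- ===== LEMMAS AND PROOFS =====

-- named copies of the two fold bodies (definitionally equal to the lambdas in the ports)
def pvStepA (merged : List (List (String × String))) (block : List (String × String)) : List (List (String × String)) :=
  let name := pvDictGetD block "activity_name" ""
  if is_pacing_subblock_py name && !merged.isEmpty then
    let parent := merged.getLastD []
    let pacing_text := name
    let parent :=
      if pvDictGetD parent "pacing" "" == "" then pvDictSet parent "pacing" pacing_text
      else pvDictSet parent "pacing" (pvDictGetD parent "pacing" "" ++ " " ++ pacing_text)
    let parent :=
      if pvDictGetD block "delivery_instructions" "" != "" then
        pvDictSet parent "delivery_instructions"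
          (PySem.Str.strip (pvDictGetD parent "delivery_instructions" "" ++ " " ++ pvDictGetD block "delivery_instructions" ""))
      else parent
    let parent :=
      if pvDictGetD block "instructor_notes" "" != "" then
        pvDictSet parent "instructor_notes"
          (PySem.Str.strip (pvDictGetD parent "instructor_notes" "" ++ " " ++ pvDictGetD block "instructor_notes" ""))
      else parent
    merged.dropLast ++ [parent]
  else merged ++ [block]

def pvStepB (gs : List (List (List (String × String)))) (block : List (String × String)) : List (List (List (String × String))) :=
  if !gs.isEmpty && is_pacing_subblock_py (pvDictGetD block "activity_name" "") then
    gs.dropLast ++ [gs.getLastD [] ++ [block]]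
  else gs ++ [[block]]

theorem portA_foldl (blocks : List (List (String × String))) :
    merge_pacing_blocks_py blocks = blocks.foldl pvStepA [] := rfl

theorem portB_foldl (blocks : List (List (String × String))) :
    merge_pacing_blocks_py_alt blocks = (blocks.foldl pvStepB []).map pvAbsorbAll := rfl

-- collapsing a group's last sub-block commutes with pvAbsorbAll
theorem pvAbsorbAll_concat (g : List (List (String × String))) (b : List (String × String)) (h : g ≠ []) :
    pvAbsorbAll (g ++ [b]) = pvAbsorb (pvAbsorbAll g) b := by
  cases g with
  | nil => exact absurd rfl h
  | cons x t => simp [pvAbsorbAll, List.foldl_append]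

-- A's merge step, when it fires, is pvAbsorb applied to the last merged block
theorem pvStepA_pos (merged : List (List (String × String))) (block : List (String × String))
    (h : (is_pacing_subblock_py (pvDictGetD block "activity_name" "") && !merged.isEmpty) = true) :
    pvStepA merged block = merged.dropLast ++ [pvAbsorb (merged.getLastD []) block] := by
  unfold pvStepA pvAbsorb
  rw [if_pos h]

-- one loop step of A equals one loop step of B, seen through pvAbsorbAll
theorem step_eq (gs : List (List (List (String × String)))) (b : List (String × String))
    (hne : ∀ g ∈ gs, g ≠ []) :
    pvStepA (gs.map pvAbsorbAll) b = (pvStepB gs b).map pvAbsorbAll := by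
  by_cases hgs : gs = []
  · subst hgs
    simp [pvStepA, pvStepB, pvAbsorbAll]
  · obtain ⟨g', glast, hsplit⟩ := (List.eq_nil_or_concat gs).resolve_left hgs
    rw [List.concat_eq_append] at hsplit
    subst hsplit
    have hlastne : glast ≠ [] := hne glast (by simp)
    by_cases hp : is_pacing_subblock_py (pvDictGetD b "activity_name" "") = true
    · have hcondA : (is_pacing_subblock_py (pvDictGetD b "activity_name" "") &&
          !((g' ++ [glast]).map pvAbsorbAll).isEmpty) = true := by simp [hp]
      rw [pvStepA_pos _ _ hcondA]
      have hcondB : (!(g' ++ [glast]).isEmpty &&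
          is_pacing_subblock_py (pvDictGetD b "activity_name" "")) = true := by simp [hp]
      unfold pvStepB
      rw [if_pos hcondB]
      simp [List.map_append, pvAbsorbAll_concat glast b hlastne]
    · simp [pvStepA, pvStepB, hp, pvAbsorbAll]

-- every group built by B's first pass is nonempty
theorem stepB_ne (gs : List (List (List (String × String)))) (b : List (String × String))
    (hne : ∀ g ∈ gs, g ≠ []) : ∀ g ∈ pvStepB gs b, g ≠ [] := by
  intro g hg
  unfold pvStepB at hg
  split at hg
  · rcases List.mem_append.1 hg with h1 | h1
    · exact hne g (List.mem_of_mem_dropLast h1)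
    · simp only [List.mem_singleton] at h1
      subst h1
      simp
  · rcases List.mem_append.1 hg with h1 | h1
    · exact hne g h1
    · simp only [List.mem_singleton] at h1
      subst h1
      simp

-- the loop invariant: A's merged list is the image of B's group list under pvAbsorbAll
theorem fold_invariant (blocks : List (List (String × String)))
    (gs : List (List (List (String × String)))) (hne : ∀ g ∈ gs, g ≠ []) :
    blocks.foldl pvStepA (gs.map pvAbsorbAll) = (blocks.foldl pvStepB gs).map pvAbsorbAll := by
  induction blocks generalizing gs with
  | nil => rfl
  | cons b rest ih =>
    simp only [List.foldl_cons]
    rw [step_eq gs b hne]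
    exact ih (pvStepB gs b) (stepB_ne gs b hne)

-- ===== VERDICT (by name: the statement is the Claim_ definition above) =====
theorem merge_pacing_blocks_py_spec : Claim_equal_merge_pacing_blocks_py := by
  intro blocks _
  show merge_pacing_blocks_py blocks = merge_pacing_blocks_py_alt blocks
  rw [portA_foldl, portB_foldl]
  exact fold_invariant blocks [] (by simp)
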